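-- pv_equiv track=rewrite | github.com/miliar/Code_Jam_Webscraper | solutions_python/Problem_77/86.py | calc_perm_lengths
-- ===== SOURCE A (Python) =====
-- def calc_perm_lengths(perm_lst,number):
--     perm_lst = [(x - 1) for x in perm_lst]
--     been_here = [False] * number
--     perm_lengths = []
--     for i in range(number):
--         if been_here[i] == False:
--             hoop_length = 1
--             x = perm_lst[i]
--             while(x != i):
--                 been_here[x] = True
--                 x = perm_lst[x]
--                 hoop_length +=1
--
--             perm_lengths.append(hoop_length)
--
--     perm_lengths = [l for l in perm_lengths if l > 1]
--
--     return sum(perm_lengths)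
-- ===== SOURCE B (Python) =====
-- def calc_perm_lengths(perm_lst, number):
--     # The cycles of length > 1 of a permutation cover exactly the non-fixed
--     # points, so the sum of their lengths is the number of indices i with
--     # perm_lst[i] != i + 1.  One linear scan, no visited bookkeeping.
--     moved = 0
--     for i in range(number):
--         if perm_lst[i] - 1 != i:
--             moved += 1
--     return moved
-- ===== Notes on version B (the rewrite author's own statement) =====
-- stated objective: simpler
-- what changed: Replaces the visited-array cycle-following (outer loop + inner while walk per cycle) by a single linear count of non-fixed points, using the identity that the total length of cycles longer than 1 equals the number of indices the permutation moves.
-- outside the precondition, e.g. on calc_perm_lengths([0, 1], 1): A returns 2, B returns 1; on calc_perm_lengths([1, 1], 2): A does not finish within the time limit, B returns 1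
import Mathlib
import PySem

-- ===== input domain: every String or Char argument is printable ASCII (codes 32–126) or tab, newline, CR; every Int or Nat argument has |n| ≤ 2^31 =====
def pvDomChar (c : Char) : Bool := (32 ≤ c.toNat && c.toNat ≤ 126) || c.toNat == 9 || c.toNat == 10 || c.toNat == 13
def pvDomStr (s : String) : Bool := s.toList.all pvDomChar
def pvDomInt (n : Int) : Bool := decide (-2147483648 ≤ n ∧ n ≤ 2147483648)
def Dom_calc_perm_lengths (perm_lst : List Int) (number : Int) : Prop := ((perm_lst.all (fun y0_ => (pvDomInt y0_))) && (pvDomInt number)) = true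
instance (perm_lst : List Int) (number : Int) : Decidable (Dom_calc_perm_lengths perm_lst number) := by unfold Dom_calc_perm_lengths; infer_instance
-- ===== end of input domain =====

-- B replaces A's visited-array cycle walking by a single count of non-fixed points
-- (total length of the cycles longer than 1 = number of moved points); objective: simpler.

-- ===== PORT A =====
-- A's inner while loop, with fuel: on Pre_ inputs a cycle over the first `number` positions
-- closes after at most `number` steps, so fuel `number.toNat` is never exhausted there;
-- outside Pre_ the Python while loop may diverge or raise (such inputs are excluded by Pre_).
def pvWhileA (perm : List Int) (i : Int) : Int → List Bool → Int → Nat → List Bool × Int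
  | _, been, hoop, 0 => (been, hoop)            -- fuel exhausted: unreachable under Pre_
  | x, been, hoop, fuel+1 =>
    if x = i then (been, hoop)
    else pvWhileA perm i (PySem.List.pyGetD perm x 0)
           (PySem.List.pySetD been x true) (hoop + 1) fuel

def calc_perm_lengths (perm_lst : List Int) (number : Int) : Int :=
  let perm := perm_lst.map (fun x => x - 1)
  let st := (PySem.List.pyRange 0 number 1).foldl
    (fun (s : List Bool × List Int) i =>
      if PySem.List.pyGetD s.1 i false = false then
        let r := pvWhileA perm i (PySem.List.pyGetD perm i 0) s.1 1 number.toNat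
        (r.1, s.2 ++ [r.2])
      else s)
    (List.replicate number.toNat false, [])
  (st.2.filter (fun l => decide (1 < l))).sum

-- ===== PORT B =====
def calc_perm_lengths_alt (perm_lst : List Int) (number : Int) : Int :=
  (PySem.List.pyRange 0 number 1).foldl
    (fun moved i =>
      if PySem.List.pyGetD perm_lst i 0 - 1 ≠ i then moved + 1 else moved) 0

-- ===== PRECONDITION & SPEC =====
-- Pre_ excludes the inputs on which A raises IndexError or loops forever (entries out of
-- range or repeated among the first `number` positions); for number < 0 A trivially returns 0
-- and both branches keep inputs with number ≤ len(perm_lst), not only number = len(perm_lst).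
def Pre_calc_perm_lengths (perm_lst : List Int) (number : Int) : Prop :=
  number < 0 ∨ (number.toNat ≤ perm_lst.length ∧
    (perm_lst.take number.toNat).Perm ((List.range number.toNat).map (fun k : ℕ => (k : Int) + 1)))

instance (perm_lst : List Int) (number : Int) : Decidable (Pre_calc_perm_lengths perm_lst number) := by
  unfold Pre_calc_perm_lengths; infer_instance

def pvWitness_calc_perm_lengths : List Int × Int := ([3, 1, 2, 4], 4)

def Spec_calc_perm_lengths (perm_lst : List Int) (number : Int) (out : Int) : Prop := out = calc_perm_lengths_alt perm_lst number
instance (perm_lst : List Int) (number : Int) (out : Int) : Decidable (Spec_calc_perm_lengths perm_lst number out) := by unfold Spec_calc_perm_lengths; infer_instance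

-- ===== CLAIM (what is proved, stated in full; the proofs are below) =====
def Claim_equal_calc_perm_lengths : Prop := ∀ (perm_lst : List Int) (number : Int), Dom_calc_perm_lengths perm_lst number → Pre_calc_perm_lengths perm_lst number → Spec_calc_perm_lengths perm_lst number (calc_perm_lengths perm_lst number)

-- ===== LEMMAS AND PROOFS =====

-- Throughout: n = number.toNat and g j = (value at position j) - 1, as a Nat; on Pre_
-- inputs with 0 ≤ number, g maps [0,n) bijectively to [0,n).

-- iterates of g stay below n
theorem pvIterLt (g : ℕ → ℕ) (n : ℕ) (hlt : ∀ j, j < n → g j < n) :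
    ∀ (t i : ℕ), i < n → g^[t] i < n := by
  intro t
  induction t with
  | zero => intro i hi; simpa using hi
  | succ t ih =>
    intro i hi
    rw [Function.iterate_succ_apply]
    exact ih _ (hlt _ hi)

-- iterates of g are injective below n
theorem pvIterInj (g : ℕ → ℕ) (n : ℕ) (hlt : ∀ j, j < n → g j < n)
    (hinj : ∀ i, i < n → ∀ j, j < n → g i = g j → i = j) :
    ∀ (t i j : ℕ), i < n → j < n → g^[t] i = g^[t] j → i = j := by
  intro t
  induction t with
  | zero => intro i j _ _ h; simpa using h
  | succ t ih =>
    intro i j hi hj h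
    rw [Function.iterate_succ_apply, Function.iterate_succ_apply] at h
    exact hinj _ hi _ hj (ih _ _ (hlt _ hi) (hlt _ hj) h)

-- every point below n is periodic with a positive period ≤ n (pigeonhole)
theorem pvExistsPeriod (g : ℕ → ℕ) (n : ℕ) (hlt : ∀ j, j < n → g j < n)
    (hinj : ∀ i, i < n → ∀ j, j < n → g i = g j → i = j)
    (i : ℕ) (hi : i < n) : ∃ k, 0 < k ∧ k ≤ n ∧ g^[k] i = i := by
  have hf : ∀ t : Fin (n+1), g^[(t : ℕ)] i < n := fun t => pvIterLt g n hlt _ _ hi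
  obtain ⟨a, b, hab, he⟩ := Fintype.exists_ne_map_eq_of_card_lt
    (fun t : Fin (n+1) => (⟨g^[(t : ℕ)] i, hf t⟩ : Fin n)) (by simp)
  rcases lt_or_gt_of_ne (Fin.val_ne_of_ne hab) with h | h
  · refine ⟨(b : ℕ) - a, by omega, by omega, ?_⟩
    have he' : g^[(a : ℕ)] i = g^[(a : ℕ)] (g^[(b : ℕ) - a] i) := by
      have hb : g^[(b : ℕ)] i = g^[(a : ℕ)] (g^[(b : ℕ) - a] i) := by
        rw [← Function.iterate_add_apply]; congr 1; omega
      rw [← hb]; exact congrArg Fin.val he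
    exact (pvIterInj g n hlt hinj _ _ _ hi (pvIterLt g n hlt _ _ hi) he').symm
  · refine ⟨(a : ℕ) - b, by omega, by omega, ?_⟩
    have he' : g^[(b : ℕ)] i = g^[(b : ℕ)] (g^[(a : ℕ) - b] i) := by
      have ha : g^[(a : ℕ)] i = g^[(b : ℕ)] (g^[(a : ℕ) - b] i) := by
        rw [← Function.iterate_add_apply]; congr 1; omega
      rw [← ha]; exact (congrArg Fin.val he).symm
    exact (pvIterInj g n hlt hinj _ _ _ hi (pvIterLt g n hlt _ _ hi) he').symm

-- the minimal positive period of i under g (meaningful on points below n)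
def pvK (g : ℕ → ℕ) (n i : ℕ) : ℕ :=
  if h : ∃ k, k ≤ n ∧ (0 < k ∧ g^[k] i = i) then Nat.find h else 1

theorem pvK_spec (g : ℕ → ℕ) (n : ℕ) (hlt : ∀ j, j < n → g j < n)
    (hinj : ∀ i, i < n → ∀ j, j < n → g i = g j → i = j) (i : ℕ) (hi : i < n) :
    0 < pvK g n i ∧ pvK g n i ≤ n ∧ g^[pvK g n i] i = i ∧
      ∀ m, 0 < m → m < pvK g n i → g^[m] i ≠ i := by
  obtain ⟨k, hk1, hk2, hk3⟩ := pvExistsPeriod g n hlt hinj i hi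
  have h : ∃ k, k ≤ n ∧ (0 < k ∧ g^[k] i = i) := ⟨k, hk2, hk1, hk3⟩
  unfold pvK
  rw [dif_pos h]
  obtain ⟨h1, h2, h3⟩ := Nat.find_spec h
  refine ⟨h2, h1, h3, ?_⟩
  intro m hm hmlt hme
  exact Nat.find_min h hmlt ⟨by omega, hm, hme⟩

-- reduce an iterate modulo a period
theorem pvIterMod (g : ℕ → ℕ) (i k : ℕ) (hk : 0 < k) (hper : g^[k] i = i) :
    ∀ t, g^[t] i = g^[t % k] i := by
  intro t
  induction t using Nat.strong_induction_on with
  | _ t ih =>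
    by_cases h : t < k
    · rw [Nat.mod_eq_of_lt h]
    · have : g^[t] i = g^[t - k] i := by
        conv_lhs => rw [show t = (t - k) + k by omega]
        rw [Function.iterate_add_apply, hper]
      rw [this, ih (t - k) (by omega)]
      congr 1
      conv_rhs => rw [show t = (t - k) + k by omega]
      rw [Nat.add_mod_right]

-- orbit membership, bounded so that it is decidable; and the orbit's minimal element
abbrev pvSameOrb (g : ℕ → ℕ) (n i j : ℕ) : Prop := ∃ t, t ≤ n ∧ g^[t] i = j

def pvOrbMin (g : ℕ → ℕ) (n i : ℕ) : ℕ :=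
  Nat.find (⟨i, 0, Nat.zero_le n, rfl⟩ : ∃ j, pvSameOrb g n i j)

-- any iterate reaches an orbit member (for i < n)
theorem pvSameOrb_of_iter (g : ℕ → ℕ) (n : ℕ) (hlt : ∀ j, j < n → g j < n)
    (hinj : ∀ i, i < n → ∀ j, j < n → g i = g j → i = j) (i : ℕ) (hi : i < n)
    (t : ℕ) : pvSameOrb g n i (g^[t] i) := by
  obtain ⟨k, hk, hkn, hper⟩ := pvExistsPeriod g n hlt hinj i hi
  exact ⟨t % k, by have := Nat.mod_lt t hk; omega, (pvIterMod g i k hk hper t).symm⟩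

theorem pvSameOrb_symm (g : ℕ → ℕ) (n : ℕ) (hlt : ∀ j, j < n → g j < n)
    (hinj : ∀ i, i < n → ∀ j, j < n → g i = g j → i = j) (i j : ℕ) (hi : i < n)
    (h : pvSameOrb g n i j) : pvSameOrb g n j i := by
  obtain ⟨t, _, ht⟩ := h
  obtain ⟨k, hk, hkn, hper⟩ := pvExistsPeriod g n hlt hinj i hi
  have hj : j = g^[t] i := ht.symm
  have hmul : g^[k * (t + 1)] i = i := by
    clear hj ht
    induction (t + 1) with
    | zero => simp
    | succ m ih => rw [Nat.mul_succ, Function.iterate_add_apply, hper, ih]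
  have hback : g^[k * (t + 1) - t] j = i := by
    rw [hj, ← Function.iterate_add_apply]
    have htle : t + 1 ≤ k * (t + 1) := Nat.le_mul_of_pos_left _ hk
    rw [show k * (t + 1) - t + t = k * (t + 1) by omega, hmul]
  have hjlt : j < n := hj ▸ pvIterLt g n hlt t i hi
  obtain ⟨kj, hkj, hkjn, hperj⟩ := pvExistsPeriod g n hlt hinj j hjlt
  refine ⟨(k * (t + 1) - t) % kj, by have := Nat.mod_lt (k * (t+1) - t) hkj; omega, ?_⟩
  rw [← pvIterMod g j kj hkj hperj, hback]

theorem pvSameOrb_trans (g : ℕ → ℕ) (n : ℕ) (hlt : ∀ j, j < n → g j < n)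
    (hinj : ∀ i, i < n → ∀ j, j < n → g i = g j → i = j) (i j l : ℕ) (hi : i < n)
    (h1 : pvSameOrb g n i j) (h2 : pvSameOrb g n j l) : pvSameOrb g n i l := by
  obtain ⟨t, _, ht⟩ := h1
  obtain ⟨s, _, hs⟩ := h2
  have : g^[s + t] i = l := by rw [Function.iterate_add_apply, ht, hs]
  exact this ▸ pvSameOrb_of_iter g n hlt hinj i hi (s + t)

theorem pvOrbMin_le (g : ℕ → ℕ) (n i j : ℕ) (h : pvSameOrb g n i j) :
    pvOrbMin g n i ≤ j := Nat.find_min' _ h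

theorem pvSameOrb_orbMin (g : ℕ → ℕ) (n i : ℕ) : pvSameOrb g n i (pvOrbMin g n i) :=
  Nat.find_spec (⟨i, 0, Nat.zero_le n, rfl⟩ : ∃ j, pvSameOrb g n i j)

theorem pvOrbMin_le_self (g : ℕ → ℕ) (n i : ℕ) : pvOrbMin g n i ≤ i :=
  pvOrbMin_le g n i i ⟨0, Nat.zero_le n, rfl⟩

theorem pvOrbMin_congr (g : ℕ → ℕ) (n : ℕ) (hlt : ∀ j, j < n → g j < n)
    (hinj : ∀ i, i < n → ∀ j, j < n → g i = g j → i = j) (i j : ℕ) (hi : i < n) (hj : j < n)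
    (h : pvSameOrb g n i j) : pvOrbMin g n i = pvOrbMin g n j := by
  have hji := pvSameOrb_symm g n hlt hinj i j hi h
  apply le_antisymm
  · exact pvOrbMin_le g n i _ (pvSameOrb_trans g n hlt hinj i j _ hi h (pvSameOrb_orbMin g n j))
  · exact pvOrbMin_le g n j _ (pvSameOrb_trans g n hlt hinj j i _ hj hji (pvSameOrb_orbMin g n i))

-- a fixed point's orbit is a singleton
theorem pvSameOrb_fixed (g : ℕ → ℕ) (n j l : ℕ) (hfix : g j = j)
    (h : pvSameOrb g n j l) : l = j := by
  obtain ⟨t, _, ht⟩ := h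
  rw [Function.iterate_fixed hfix] at ht
  omega

-- membership in the orbit of i characterised by iterates below the minimal period
theorem pvSameOrb_iff_lt_pvK (g : ℕ → ℕ) (n : ℕ) (hlt : ∀ j, j < n → g j < n)
    (hinj : ∀ i, i < n → ∀ j, j < n → g i = g j → i = j) (i j : ℕ) (hi : i < n) :
    pvSameOrb g n i j ↔ ∃ t, t < pvK g n i ∧ g^[t] i = j := by
  obtain ⟨hk1, hk2, hk3, hk4⟩ := pvK_spec g n hlt hinj i hi
  constructor
  · rintro ⟨t, _, ht⟩
    exact ⟨t % pvK g n i, Nat.mod_lt t hk1, by rw [← pvIterMod g i _ hk1 hk3, ht]⟩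
  · rintro ⟨t, htk, ht⟩
    exact ⟨t, by omega, ht⟩

-- iterates below the minimal period are pairwise distinct
theorem pvIterDistinctK (g : ℕ → ℕ) (n : ℕ) (hlt : ∀ j, j < n → g j < n)
    (hinj : ∀ i, i < n → ∀ j, j < n → g i = g j → i = j) (i : ℕ) (hi : i < n)
    (a b : ℕ) (hab : a < b) (hb : b < pvK g n i) : g^[a] i ≠ g^[b] i := by
  obtain ⟨hk1, hk2, hk3, hk4⟩ := pvK_spec g n hlt hinj i hi
  intro he
  have he' : g^[a] i = g^[a] (g^[b - a] i) := by
    rw [he, ← Function.iterate_add_apply]; congr 1; omega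
  have hcan := pvIterInj g n hlt hinj a _ _ hi (pvIterLt g n hlt _ _ hi) he'
  exact hk4 (b - a) (by omega) (by omega) hcan.symm

-- fuel bound: the while loop run from g^[c] i with hoop counter c returns hoop = pvK
-- and marks exactly the orbit points g^[t] i for c ≤ t < pvK
theorem pvWhileA_spec (perm : List Int) (g : ℕ → ℕ) (n : ℕ)
    (hlt : ∀ j, j < n → g j < n)
    (hinj : ∀ i, i < n → ∀ j, j < n → g i = g j → i = j)
    (hPG : ∀ j, j < n → PySem.List.pyGetD perm ((j : ℕ) : Int) 0 = ((g j : ℕ) : Int))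
    (m : ℕ) (hm : m < n) :
    ∀ fuel c been, 1 ≤ c → c ≤ pvK g n m → pvK g n m - c ≤ fuel → been.length = n →
      (pvWhileA perm (m : Int) ((g^[c] m : ℕ) : Int) been (c : Int) fuel).2 = ((pvK g n m : ℕ) : Int) ∧
      (pvWhileA perm (m : Int) ((g^[c] m : ℕ) : Int) been (c : Int) fuel).1.length = n ∧
      ∀ j, j < n →
        ((pvWhileA perm (m : Int) ((g^[c] m : ℕ) : Int) been (c : Int) fuel).1.getD j false = true ↔
          (been.getD j false = true ∨ ∃ t, c ≤ t ∧ t < pvK g n m ∧ g^[t] m = j)) := by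
  obtain ⟨hk1, hk2, hk3, hk4⟩ := pvK_spec g n hlt hinj m hm
  intro fuel
  induction fuel with
  | zero =>
    intro c been hc1 hck hfuel hbl
    have hck' : c = pvK g n m := by omega
    subst hck'
    unfold pvWhileA
    refine ⟨rfl, hbl, ?_⟩
    intro j hj
    simp only
    constructor
    · intro h; exact Or.inl h
    · rintro (h | ⟨t, ht1, ht2, _⟩)
      · exact h
      · omega
  | succ fuel ih =>
    intro c been hc1 hck hfuel hbl
    by_cases hx : ((g^[c] m : ℕ) : Int) = (m : Int)
    · have hcm : g^[c] m = m := by exact_mod_cast hx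
      have hck' : c = pvK g n m := by
        by_contra hne
        exact hk4 c (by omega) (by omega) hcm
      subst hck'
      unfold pvWhileA
      rw [if_pos hx]
      refine ⟨rfl, hbl, ?_⟩
      intro j hj
      constructor
      · intro h; exact Or.inl h
      · rintro (h | ⟨t, ht1, ht2, _⟩)
        · exact h
        · omega
    · have hcm : g^[c] m ≠ m := fun h => hx (by exact_mod_cast h)
      have hclt : c < pvK g n m := by
        rcases Nat.lt_or_ge c (pvK g n m) with h | h
        · exact h
        · exfalso
          apply hcm
          have hce : c = pvK g n m := by omega
          rw [hce]
          exact hk3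
      have hgc : g^[c] m < n := pvIterLt g n hlt c m hm
      unfold pvWhileA
      rw [if_neg hx]
      rw [hPG _ hgc, PySem.List.pySetD_natCast]
      rw [show g (g^[c] m) = g^[c+1] m from (Function.iterate_succ_apply' g c m).symm]
      rw [show ((c : ℕ) : Int) + 1 = ((c + 1 : ℕ) : Int) from by push_cast; ring]
      have hlen : (been.set (g^[c] m) true).length = n := by simp [hbl]
      obtain ⟨h1, h2, h3⟩ := ih (c + 1) (been.set (g^[c] m) true) (by omega) (by omega) (by omega) hlen
      refine ⟨h1, h2, ?_⟩
      intro j hj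
      rw [h3 j hj]
      have hset : (been.set (g^[c] m) true).getD j false = true ↔
          (j = g^[c] m ∨ been.getD j false = true) := by
        simp only [List.getD, List.getElem?_set]
        by_cases hje : g^[c] m = j
        · simp [hje, hbl, hj]
        · have hje' : ¬ (j = g^[c] m) := fun h => hje h.symm
          simp [hje, hje']
      rw [hset]
      constructor
      · rintro (⟨hje | hb⟩ | ⟨t, ht1, ht2, ht3⟩)
        · exact Or.inr ⟨c, le_refl c, hclt, hje.symm⟩
        · exact Or.inl hb
        · exact Or.inr ⟨t, by omega, ht2, ht3⟩
      · rintro (hb | ⟨t, ht1, ht2, ht3⟩)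
        · exact Or.inl (Or.inr hb)
        · by_cases htc : t = c
          · exact Or.inl (Or.inl (by rw [← ht3, htc]))
          · exact Or.inr ⟨t, by omega, ht2, ht3⟩

-- the per-orbit counting set {j < n | pvOrbMin j = m, g j ≠ j}
theorem pvFilterOrbEq (g : ℕ → ℕ) (n : ℕ) (hlt : ∀ j, j < n → g j < n)
    (hinj : ∀ i, i < n → ∀ j, j < n → g i = g j → i = j) (m : ℕ) (hm : m < n) :
    ((Finset.range n).filter (fun j => pvOrbMin g n j = m ∧ g j ≠ j)).card =
      if pvOrbMin g n m = m ∧ g m ≠ m then pvK g n m else 0 := by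
  by_cases hrep : pvOrbMin g n m = m ∧ g m ≠ m
  · rw [if_pos hrep]
    have hset : ((Finset.range n).filter (fun j => pvOrbMin g n j = m ∧ g j ≠ j)) =
        (Finset.range (pvK g n m)).image (fun t => g^[t] m) := by
      ext j
      simp only [Finset.mem_filter, Finset.mem_range, Finset.mem_image]
      constructor
      · rintro ⟨hj, hjm, hgj⟩
        have h1 : pvSameOrb g n j m := hjm ▸ pvSameOrb_orbMin g n j
        have h2 : pvSameOrb g n m j := pvSameOrb_symm g n hlt hinj j m hj h1
        obtain ⟨t, htk, ht⟩ := (pvSameOrb_iff_lt_pvK g n hlt hinj m j hm).mp h2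
        exact ⟨t, htk, ht⟩
      · rintro ⟨t, htk, ht⟩
        have hj : j < n := ht ▸ pvIterLt g n hlt t m hm
        have hmj : pvSameOrb g n m j := (pvSameOrb_iff_lt_pvK g n hlt hinj m j hm).mpr ⟨t, htk, ht⟩
        have hco : pvOrbMin g n j = m := by
          rw [← pvOrbMin_congr g n hlt hinj m j hm hj hmj, hrep.1]
        refine ⟨hj, hco, ?_⟩
        intro hfix
        have hjm : pvSameOrb g n j m := pvSameOrb_symm g n hlt hinj m j hm hmj
        have : m = j := pvSameOrb_fixed g n j m hfix hjm
        exact hrep.2 (this ▸ hfix)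
    rw [hset, Finset.card_image_of_injOn, Finset.card_range]
    intro a ha b hb hab
    simp only [Finset.coe_range, Set.mem_Iio] at ha hb
    by_contra hne
    rcases Nat.lt_or_ge a b with h | h
    · exact pvIterDistinctK g n hlt hinj m hm a b h hb hab
    · exact pvIterDistinctK g n hlt hinj m hm b a (by omega) ha hab.symm
  · rw [if_neg hrep]
    rw [Finset.card_eq_zero, Finset.filter_eq_empty_iff]
    intro j hj
    simp only [Finset.mem_range] at hj
    rintro ⟨hjm, hgj⟩
    have h1 : pvSameOrb g n j m := hjm ▸ pvSameOrb_orbMin g n j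
    have hrm : pvOrbMin g n m = m := by
      rw [← pvOrbMin_congr g n hlt hinj j m hj hm h1, hjm]
    have h2 : pvSameOrb g n m j := pvSameOrb_symm g n hlt hinj j m hj h1
    rcases Decidable.not_and_iff_not_or_not.mp hrep with h | h
    · exact h hrm
    · have hfix : g m = m := Decidable.not_not.mp h
      have : j = m := pvSameOrb_fixed g n m j hfix h2
      exact hgj (by rw [this, hfix])

-- one outer step of the counting set
theorem pvCardStep (g : ℕ → ℕ) (n : ℕ) (hlt : ∀ j, j < n → g j < n)
    (hinj : ∀ i, i < n → ∀ j, j < n → g i = g j → i = j) (m : ℕ) (hm : m < n) :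
    ((Finset.range n).filter (fun j => pvOrbMin g n j < m + 1 ∧ g j ≠ j)).card =
      ((Finset.range n).filter (fun j => pvOrbMin g n j < m ∧ g j ≠ j)).card +
      (if pvOrbMin g n m = m ∧ g m ≠ m then pvK g n m else 0) := by
  rw [← pvFilterOrbEq g n hlt hinj m hm]
  rw [← Finset.card_union_of_disjoint (by
    rw [Finset.disjoint_filter]
    rintro j _ ⟨h1, _⟩ ⟨h2, _⟩
    omega)]
  congr 1
  rw [← Finset.filter_or]
  apply Finset.filter_congr
  intro j _
  constructor
  · rintro ⟨h1, h2⟩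
    rcases Nat.lt_or_ge (pvOrbMin g n j) m with h | h
    · exact Or.inl ⟨h, h2⟩
    · exact Or.inr ⟨by omega, h2⟩
  · rintro (⟨h1, h2⟩ | ⟨h1, h2⟩)
    · exact ⟨by omega, h2⟩
    · exact ⟨by omega, h2⟩

-- the main invariant of A's outer loop
theorem pvFoldA (perm : List Int) (g : ℕ → ℕ) (n : ℕ)
    (hlt : ∀ j, j < n → g j < n)
    (hinj : ∀ i, i < n → ∀ j, j < n → g i = g j → i = j)
    (hPG : ∀ j, j < n → PySem.List.pyGetD perm ((j : ℕ) : Int) 0 = ((g j : ℕ) : Int)) :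
    ∀ m, m ≤ n →
      (((List.range m).map (fun j => ((j : ℕ) : Int))).foldl
        (fun (s : List Bool × List Int) i =>
          if PySem.List.pyGetD s.1 i false = false then
            ((pvWhileA perm i (PySem.List.pyGetD perm i 0) s.1 1 n).1,
              s.2 ++ [(pvWhileA perm i (PySem.List.pyGetD perm i 0) s.1 1 n).2])
          else s)
        (List.replicate n false, [])).1.length = n ∧
      (∀ j, j < n →
        ((((List.range m).map (fun j => ((j : ℕ) : Int))).foldl
          (fun (s : List Bool × List Int) i =>
            if PySem.List.pyGetD s.1 i false = false then
              ((pvWhileA perm i (PySem.List.pyGetD perm i 0) s.1 1 n).1,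
                s.2 ++ [(pvWhileA perm i (PySem.List.pyGetD perm i 0) s.1 1 n).2])
            else s)
          (List.replicate n false, [])).1.getD j false = true ↔
          (pvOrbMin g n j < m ∧ pvOrbMin g n j ≠ j))) ∧
      ((((List.range m).map (fun j => ((j : ℕ) : Int))).foldl
        (fun (s : List Bool × List Int) i =>
          if PySem.List.pyGetD s.1 i false = false then
            ((pvWhileA perm i (PySem.List.pyGetD perm i 0) s.1 1 n).1,
              s.2 ++ [(pvWhileA perm i (PySem.List.pyGetD perm i 0) s.1 1 n).2])
          else s)
        (List.replicate n false, [])).2.filter (fun l => decide (1 < l))).sum =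
        ((((Finset.range n).filter (fun j => pvOrbMin g n j < m ∧ g j ≠ j)).card : ℕ) : Int) := by
  intro m
  induction m with
  | zero =>
    intro _
    refine ⟨by simp, ?_, by simp⟩
    intro j hj
    simp
  | succ m ih =>
    intro hm1
    obtain ⟨ihlen, ihbeen, ihsum⟩ := ih (by omega)
    have hmn : m < n := by omega
    rw [List.range_succ, List.map_append, List.foldl_append]
    simp only [List.map_cons, List.map_nil, List.foldl_cons, List.foldl_nil]
    set st := (((List.range m).map (fun j => ((j : ℕ) : Int))).foldl
        (fun (s : List Bool × List Int) i =>
          if PySem.List.pyGetD s.1 i false = false then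
            ((pvWhileA perm i (PySem.List.pyGetD perm i 0) s.1 1 n).1,
              s.2 ++ [(pvWhileA perm i (PySem.List.pyGetD perm i 0) s.1 1 n).2])
          else s)
        (List.replicate n false, [])) with hst
    have hcond : PySem.List.pyGetD st.1 ((m : ℕ) : Int) false = st.1.getD m false := by
      rw [PySem.List.pyGetD_natCast]
    by_cases hrep : pvOrbMin g n m = m
    · -- m is its orbit's representative: A enters the while loop
      have hunmarked : st.1.getD m false = false := by
        rcases Bool.eq_false_or_eq_true (st.1.getD m false) with h | h
        · obtain ⟨hh1, hh2⟩ := (ihbeen m hmn).mp h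
          omega
        · exact h
      rw [hcond, hunmarked, if_pos rfl]
      obtain ⟨hk1, hk2, hk3, hk4⟩ := pvK_spec g n hlt hinj m hmn
      have hstart : PySem.List.pyGetD perm ((m : ℕ) : Int) 0 = ((g^[1] m : ℕ) : Int) := by
        rw [hPG m hmn]; simp
      obtain ⟨hw2, hw1len, hwmark⟩ := pvWhileA_spec perm g n hlt hinj hPG m hmn n 1 st.1
        (le_refl 1) hk1 (by omega) ihlen
      simp only [Nat.cast_one] at hw2 hw1len hwmark
      rw [hstart]
      refine ⟨hw1len, ?_, ?_⟩
      · intro j hj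
        rw [hwmark j hj]
        constructor
        · rintro (hb | ⟨t, ht1, ht2, ht3⟩)
          · have := (ihbeen j hj).mp hb
            exact ⟨by omega, this.2⟩
          · have hmj : pvSameOrb g n m j :=
              (pvSameOrb_iff_lt_pvK g n hlt hinj m j hmn).mpr ⟨t, ht2, ht3⟩
            have hco : pvOrbMin g n j = m := by
              rw [← pvOrbMin_congr g n hlt hinj m j hmn hj hmj, hrep]
            refine ⟨by omega, ?_⟩
            rw [hco]
            intro hjm
            exact hk4 t (by omega) ht2 (by rw [ht3, ← hjm])
        · rintro ⟨h1, h2⟩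
          rcases Nat.lt_or_ge (pvOrbMin g n j) m with h | h
          · exact Or.inl ((ihbeen j hj).mpr ⟨h, h2⟩)
          · have hco : pvOrbMin g n j = m := by omega
            have h1' : pvSameOrb g n j m := hco ▸ pvSameOrb_orbMin g n j
            have h2' : pvSameOrb g n m j := pvSameOrb_symm g n hlt hinj j m hj h1'
            obtain ⟨t, htk, ht⟩ := (pvSameOrb_iff_lt_pvK g n hlt hinj m j hmn).mp h2'
            have ht0 : t ≠ 0 := by
              intro h0
              rw [h0] at ht
              simp at ht
              exact h2 (by omega)
            exact Or.inr ⟨t, by omega, htk, ht⟩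
      · rw [List.filter_append, List.sum_append, ihsum,
          pvCardStep g n hlt hinj m hmn]
        by_cases hfix : g m = m
        · have hkone : pvK g n m = 1 := by
            by_contra hne
            exact hk4 1 (by omega) (by omega) (by simpa using hfix)
          rw [if_neg (by tauto)]
          rw [hw2, hkone]
          norm_num
        · rw [if_pos ⟨hrep, hfix⟩]
          have hkgt : 1 < pvK g n m := by
            by_contra hle
            have : pvK g n m = 1 := by omega
            rw [this] at hk3
            simp at hk3
            exact hfix hk3
          rw [hw2]
          have : List.filter (fun l => decide (1 < l)) [((pvK g n m : ℕ) : Int)] =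
              [((pvK g n m : ℕ) : Int)] := by
            simp only [List.filter]
            rw [decide_eq_true (by exact_mod_cast hkgt)]
          rw [this]
          push_cast
          simp
    · -- m was already visited: A skips it
      have hrlt : pvOrbMin g n m < m := by
        have := pvOrbMin_le_self g n m
        omega
      have hmarked : st.1.getD m false = true :=
        (ihbeen m hmn).mpr ⟨hrlt, by omega⟩
      rw [hcond, hmarked, if_neg (by simp)]
      have hnorep : ∀ j, j < n → pvOrbMin g n j ≠ m := by
        intro j hj hjm
        have h1 : pvSameOrb g n j m := hjm ▸ pvSameOrb_orbMin g n j
        have h2 : pvOrbMin g n j = pvOrbMin g n m :=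
          pvOrbMin_congr g n hlt hinj j m hj hmn h1
        omega
      refine ⟨ihlen, ?_, ?_⟩
      · intro j hj
        rw [ihbeen j hj]
        have := hnorep j hj
        constructor
        · rintro ⟨h1, h2⟩; exact ⟨by omega, h2⟩
        · rintro ⟨h1, h2⟩; exact ⟨by omega, h2⟩
      · rw [ihsum, pvCardStep g n hlt hinj m hmn]
        rw [if_neg (by tauto)]
        norm_num
  
-- B's loop counts the non-fixed points
theorem pvFoldB (perm_lst : List Int) (g : ℕ → ℕ) (n : ℕ)
    (hv : ∀ j, j < n → PySem.List.pyGetD perm_lst ((j : ℕ) : Int) 0 - 1 = ((g j : ℕ) : Int)) :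
    ∀ m, m ≤ n →
      (((List.range m).map (fun j => ((j : ℕ) : Int))).foldl
        (fun moved i =>
          if PySem.List.pyGetD perm_lst i 0 - 1 ≠ i then moved + 1 else moved) 0) =
      ((((Finset.range m).filter (fun j => g j ≠ j)).card : ℕ) : Int) := by
  intro m
  induction m with
  | zero => simp
  | succ m ih =>
    intro hm1
    rw [List.range_succ, List.map_append, List.foldl_append]
    simp only [List.map_cons, List.map_nil, List.foldl_cons, List.foldl_nil]
    rw [ih (by omega)]
    have hmn : m < n := by omega
    rw [Finset.range_add_one, Finset.filter_insert]
    by_cases hfix : g m = m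
    · have : ¬ (PySem.List.pyGetD perm_lst ((m : ℕ) : Int) 0 - 1 ≠ ((m : ℕ) : Int)) := by
        rw [hv m hmn, hfix]
        simp
      rw [if_neg this, if_neg (by simpa using hfix)]
    · have : PySem.List.pyGetD perm_lst ((m : ℕ) : Int) 0 - 1 ≠ ((m : ℕ) : Int) := by
        rw [hv m hmn]
        exact_mod_cast hfix
      rw [if_pos this, if_pos (by simpa using hfix)]
      rw [Finset.card_insert_of_notMem (by simp)]
      push_cast
      ring

-- the two ports agree on any Pre_ input with the permutation-shape hypotheses
theorem pvMain (perm_lst : List Int) (number : Int)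
    (hlen : number.toNat ≤ perm_lst.length)
    (hperm : (perm_lst.take number.toNat).Perm
      ((List.range number.toNat).map (fun k : ℕ => (k : Int) + 1))) :
    calc_perm_lengths perm_lst number = calc_perm_lengths_alt perm_lst number := by
  set n := number.toNat with hn
  have hlentake : (perm_lst.take n).length = n := by
    rw [List.length_take]; omega
  -- every entry of the first n positions is k+1 for some k < n
  have hval : ∀ j, j < n → ∃ k, k < n ∧ perm_lst.getD j 0 = (k : Int) + 1 := by
    intro j hj
    have hjt : j < (perm_lst.take n).length := by omega
    have hmem : (perm_lst.take n)[j] ∈ perm_lst.take n := List.getElem_mem hjt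
    rw [hperm.mem_iff] at hmem
    obtain ⟨k, hk, he⟩ := List.mem_map.mp hmem
    refine ⟨k, List.mem_range.mp hk, ?_⟩
    rw [List.getD_eq_getElem perm_lst 0 (by omega),
      ← List.getElem_take (xs := perm_lst) (i := j) (h := hjt), ← he]
  set g : ℕ → ℕ := fun j => (perm_lst.getD j 0 - 1).toNat with hg
  have hcast : ∀ j, j < n → ((g j : ℕ) : Int) = perm_lst.getD j 0 - 1 := by
    intro j hj
    obtain ⟨k, hk, he⟩ := hval j hj
    rw [hg]
    simp only
    rw [he]
    simp
  have hlt : ∀ j, j < n → g j < n := by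
    intro j hj
    obtain ⟨k, hk, he⟩ := hval j hj
    have : ((g j : ℕ) : Int) = (k : Int) := by rw [hcast j hj, he]; ring
    omega
  have hnd : (perm_lst.take n).Nodup := by
    rw [hperm.nodup_iff]
    exact List.Nodup.map (fun a b h => by omega) List.nodup_range
  have hinj : ∀ i, i < n → ∀ j, j < n → g i = g j → i = j := by
    intro i hi j hj he
    have hgetl : perm_lst.getD i 0 = perm_lst.getD j 0 := by
      have h1 := hcast i hi
      have h2 := hcast j hj
      rw [he] at h1
      omega
    have hti : i < (perm_lst.take n).length := by omega
    have htj : j < (perm_lst.take n).length := by omega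
    have : (perm_lst.take n)[i] = (perm_lst.take n)[j] := by
      rw [List.getElem_take (xs := perm_lst) (i := i) (h := hti),
        List.getElem_take (xs := perm_lst) (i := j) (h := htj),
        ← List.getD_eq_getElem perm_lst 0 (by omega : i < perm_lst.length),
        ← List.getD_eq_getElem perm_lst 0 (by omega : j < perm_lst.length), hgetl]
    exact hnd.getElem_inj_iff.mp this
  have hPG : ∀ j, j < n → PySem.List.pyGetD (perm_lst.map (fun x => x - 1)) ((j : ℕ) : Int) 0 =
      ((g j : ℕ) : Int) := by
    intro j hj
    rw [PySem.List.pyGetD_natCast, hcast j hj]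
    have hjl : j < perm_lst.length := by omega
    rw [List.getD_eq_getElem _ 0 (by simpa using hjl), List.getElem_map,
      ← List.getD_eq_getElem perm_lst 0 hjl]
  have hvB : ∀ j, j < n → PySem.List.pyGetD perm_lst ((j : ℕ) : Int) 0 - 1 = ((g j : ℕ) : Int) := by
    intro j hj
    rw [PySem.List.pyGetD_natCast, hcast j hj]
  have hrange : PySem.List.pyRange 0 number 1 = (List.range n).map (fun j => ((j : ℕ) : Int)) := by
    rw [PySem.List.pyRange_one]
    simp [hn]
  obtain ⟨_, _, hsum⟩ :=
    pvFoldA (perm_lst.map (fun x => x - 1)) g n hlt hinj hPG n (le_refl n)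
  have hB := pvFoldB perm_lst g n hvB n (le_refl n)
  unfold calc_perm_lengths calc_perm_lengths_alt
  simp only [hrange, ← hn]
  rw [hsum, hB]
  congr 2
  apply Finset.filter_congr
  intro j hj
  have hjn := Finset.mem_range.mp hj
  have := pvOrbMin_le_self g n j
  constructor
  · rintro ⟨_, h⟩; exact h
  · intro h; exact ⟨by omega, h⟩

-- ===== VERDICT (by name: the statement is the Claim_ definition above) =====
theorem calc_perm_lengths_spec : Claim_equal_calc_perm_lengths := by
  intro perm_lst number _ hpre
  unfold Spec_calc_perm_lengths
  rcases hpre with hneg | ⟨hlen, hperm⟩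
  · unfold calc_perm_lengths calc_perm_lengths_alt
    rw [PySem.List.pyRange_one_eq_nil (by omega)]
    simp
  · exact pvMain perm_lst number hlen hperm
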